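-- pv_equiv track=rewrite | github.com/bs-machinelearning/Randomness-in-Algorithm-Trading | tests/skeleton_adaptive_loop.py | detect_oscillation
-- ===== SOURCE A (Python) =====
-- from typing import Dict, List, Optional, Callable, Tuple, Any
--
-- def detect_oscillation(
--     adjustment_history: List[Dict],
--     window: int = 3
-- ) -> bool:
--     """
--     Detect if adjustments are oscillating.
--
--     Oscillation patterns:
--     - INCREASE → DECREASE → INCREASE
--     - DECREASE → INCREASE → DECREASE
--     - NUDGE_UP → NUDGE_DOWN → NUDGE_UP
--     - NUDGE_DOWN → NUDGE_UP → NUDGE_DOWN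
--
--     Args:
--         adjustment_history: List of adjustment records
--         window: Number of recent adjustments to check
--
--     Returns:
--         is_oscillating: bool
--
--     Examples:
--         >>> history = [
--         ...     {'action': 'INCREASE'},
--         ...     {'action': 'DECREASE'},
--         ...     {'action': 'INCREASE'}
--         ... ]
--         >>> detect_oscillation(history, window=3)
--         True
--     """
--     if len(adjustment_history) < window:
--         return False
--
--     # Get last N actions
--     last_actions = [rec['action'] for rec in adjustment_history[-window:]]
--
--     # Define oscillation patterns
--     oscillation_patterns = [
--         ['INCREASE', 'DECREASE', 'INCREASE'],
--         ['DECREASE', 'INCREASE', 'DECREASE'],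
--         ['NUDGE_UP', 'NUDGE_DOWN', 'NUDGE_UP'],
--         ['NUDGE_DOWN', 'NUDGE_UP', 'NUDGE_DOWN']
--     ]
--
--     # Check if last N actions match any pattern
--     for pattern in oscillation_patterns:
--         if last_actions == pattern:
--             return True
--
--     return False
-- ===== SOURCE B (Python) =====
-- _PAIRS = {frozenset({'INCREASE', 'DECREASE'}), frozenset({'NUDGE_UP', 'NUDGE_DOWN'})}
--
--
-- def detect_oscillation(adjustment_history, window=3):
--     if len(adjustment_history) < window:
--         return False
--     last = [rec['action'] for rec in adjustment_history[-window:]]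
--     if len(last) != 3:
--         return False
--     a, b, c = last
--     return a == c and a != b and frozenset((a, b)) in _PAIRS
-- ===== Notes on version B (the rewrite author's own statement) =====
-- stated objective: simpler
-- what changed: Replaces A's enumeration of four hard-coded oscillation patterns and the scan over them by a direct structural check on the three actions (first == third, first != second, {first, second} an opposite pair).
import Mathlib
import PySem

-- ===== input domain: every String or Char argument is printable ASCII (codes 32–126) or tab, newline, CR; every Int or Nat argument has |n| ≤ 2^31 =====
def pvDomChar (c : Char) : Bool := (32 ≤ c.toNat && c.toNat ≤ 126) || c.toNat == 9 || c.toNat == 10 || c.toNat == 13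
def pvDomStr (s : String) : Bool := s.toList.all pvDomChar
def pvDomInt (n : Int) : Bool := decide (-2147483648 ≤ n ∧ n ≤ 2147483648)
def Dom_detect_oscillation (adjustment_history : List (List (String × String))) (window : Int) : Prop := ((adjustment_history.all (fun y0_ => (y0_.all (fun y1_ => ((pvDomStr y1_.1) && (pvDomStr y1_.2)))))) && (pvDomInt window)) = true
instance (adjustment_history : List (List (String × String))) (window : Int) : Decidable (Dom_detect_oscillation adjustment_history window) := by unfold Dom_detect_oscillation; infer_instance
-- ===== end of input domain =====

-- B replaces A's enumerated list of four oscillation patterns by a direct structural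
-- check (first == third, first ≠ second, {first, second} an opposite pair): simpler.

-- rec['action']: first-match dict lookup; Pre_ guarantees the key is present where evaluated
def pvAction (rec : List (String × String)) : String :=
  ((PySem.Dict.mk rec).get? "action").getD ""

-- ===== PORT A =====
def detect_oscillation (adjustment_history : List (List (String × String))) (window : Int) : Bool :=
  if (adjustment_history.length : Int) < window then false
  else
    let last_actions := (PySem.List.slice adjustment_history (some (-window)) none).map pvAction
    let oscillation_patterns : List (List String) :=
      [["INCREASE", "DECREASE", "INCREASE"],
       ["DECREASE", "INCREASE", "DECREASE"],
       ["NUDGE_UP", "NUDGE_DOWN", "NUDGE_UP"],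
       ["NUDGE_DOWN", "NUDGE_UP", "NUDGE_DOWN"]]
    -- for pattern in patterns: if last_actions == pattern: return True; return False
    oscillation_patterns.any (fun pattern => last_actions == pattern)

-- ===== PORT B =====
def detect_oscillation_alt (adjustment_history : List (List (String × String))) (window : Int) : Bool :=
  if (adjustment_history.length : Int) < window then false
  else
    let last := (PySem.List.slice adjustment_history (some (-window)) none).map pvAction
    match last with
    | [a, b, c] =>
        -- a == c and a != b and frozenset((a, b)) in _PAIRS (membership unordered)
        a == c && a != b &&
          ((a == "INCREASE" && b == "DECREASE") || (a == "DECREASE" && b == "INCREASE") ||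
           (a == "NUDGE_UP" && b == "NUDGE_DOWN") || (a == "NUDGE_DOWN" && b == "NUDGE_UP"))
    | _ => false

-- ===== PRECONDITION & SPEC =====
-- Both A and B raise KeyError when a record in the examined tail lacks the key 'action';
-- Pre_ excludes exactly those inputs (when len < window nothing is looked up).
def Pre_detect_oscillation (adjustment_history : List (List (String × String))) (window : Int) : Prop :=
  (adjustment_history.length : Int) < window ∨
    ∀ rec ∈ PySem.List.slice adjustment_history (some (-window)) none,
      "action" ∈ rec.map Prod.fst
instance (adjustment_history : List (List (String × String))) (window : Int) : Decidable (Pre_detect_oscillation adjustment_history window) := by unfold Pre_detect_oscillation; infer_instance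

def pvWitness_detect_oscillation : (List (List (String × String))) × Int :=
  ([[("action", "INCREASE")], [("action", "DECREASE")], [("action", "INCREASE")]], 3)

def Spec_detect_oscillation (adjustment_history : List (List (String × String))) (window : Int) (out : Bool) : Prop := out = detect_oscillation_alt adjustment_history window
instance (adjustment_history : List (List (String × String))) (window : Int) (out : Bool) : Decidable (Spec_detect_oscillation adjustment_history window out) := by unfold Spec_detect_oscillation; infer_instance

-- ===== CLAIM (what is proved, stated in full; the proofs are below) =====
def Claim_equal_detect_oscillation : Prop := ∀ (adjustment_history : List (List (String × String))) (window : Int), Dom_detect_oscillation adjustment_history window → Pre_detect_oscillation adjustment_history window → Spec_detect_oscillation adjustment_history window (detect_oscillation adjustment_history window)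

-- ===== LEMMAS AND PROOFS =====

-- core: A's pattern-list scan equals B's structural check, for any action list
theorem pattern_scan_eq (l : List String) :
    ([["INCREASE", "DECREASE", "INCREASE"],
      ["DECREASE", "INCREASE", "DECREASE"],
      ["NUDGE_UP", "NUDGE_DOWN", "NUDGE_UP"],
      ["NUDGE_DOWN", "NUDGE_UP", "NUDGE_DOWN"]].any (fun p => l == p))
    = (match l with
       | [a, b, c] =>
           a == c && a != b &&
             ((a == "INCREASE" && b == "DECREASE") || (a == "DECREASE" && b == "INCREASE") ||
              (a == "NUDGE_UP" && b == "NUDGE_DOWN") || (a == "NUDGE_DOWN" && b == "NUDGE_UP"))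
       | _ => false) := by
  match l with
  | [] => simp
  | [a] => simp
  | [a, b] => simp
  | a :: b :: c :: d :: rest => simp
  | [a, b, c] =>
    simp only [List.any_cons, List.any_nil, Bool.or_false]
    rw [Bool.eq_iff_iff]
    simp only [Bool.or_eq_true, Bool.and_eq_true, beq_iff_eq, bne_iff_ne, ne_eq,
      List.cons.injEq, and_true]
    constructor
    · rintro (⟨rfl, rfl, rfl⟩ | ⟨rfl, rfl, rfl⟩ | ⟨rfl, rfl, rfl⟩ | ⟨rfl, rfl, rfl⟩) <;> decide
    · rintro ⟨⟨rfl, hab⟩, ((⟨rfl, rfl⟩ | ⟨rfl, rfl⟩) | ⟨rfl, rfl⟩) | ⟨rfl, rfl⟩⟩ <;> decide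

-- ===== VERDICT (by name: the statement is the Claim_ definition above) =====
theorem detect_oscillation_spec : Claim_equal_detect_oscillation := by
  intro h w _ _
  unfold Spec_detect_oscillation detect_oscillation detect_oscillation_alt
  split_ifs with hlt
  · rfl
  · exact pattern_scan_eq _
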